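-- pv_equiv track=rewrite | github.com/Dani-96S/Methods-in-AI-research | deduction_algorithm.py | order_preferences
-- ===== SOURCE A (Python) =====
-- def order_preferences(preferences, sentence):
--     ordered_preferences = []
--     ordered_sentence = ""
--     for word in sentence:
--         ordered_sentence += " {}".format(word)
--         for preference in preferences:
--             var, val, key, subtree = preference
--             if subtree[0] in ordered_sentence and \
--                preference not in ordered_preferences:
--                 ordered_preferences.append(preference)
--     return ordered_preferences
-- ===== SOURCE B (Python) =====
-- def order_preferences(preferences, sentence):
--     # Bucket approach: build the full text once, locate each preference's phrase
--     # with a single find, convert the match end into the first word-prefix that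
--     # contains it, and emit buckets in word order (stable within a bucket).
--     if not sentence:
--         return []
--     text = ""
--     cum = []
--     for word in sentence:
--         text += " " + word
--         cum.append(len(text))
--     unique = []
--     for pref in preferences:
--         if pref not in unique:
--             unique.append(pref)
--     buckets = [[] for _ in sentence]
--     for pref in unique:
--         sub = pref[3][0]
--         pos = text.find(sub)
--         if pos != -1:
--             end = pos + len(sub)
--             k = 0
--             while cum[k] < end:
--                 k += 1
--             buckets[k].append(pref)
--     return [pref for bucket in buckets for pref in bucket]
-- ===== Notes on version B (the rewrite author's own statement) =====
-- stated objective: faster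
-- what changed: Instead of rescanning the growing sentence string for every preference after every word (nested loops with substring search each time), B builds the full text once, locates each deduplicated preference's phrase with a single find, converts the match end into the first word-prefix containing it via cumulative lengths, and bucket-sorts the preferences by that word index.
import Mathlib
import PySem

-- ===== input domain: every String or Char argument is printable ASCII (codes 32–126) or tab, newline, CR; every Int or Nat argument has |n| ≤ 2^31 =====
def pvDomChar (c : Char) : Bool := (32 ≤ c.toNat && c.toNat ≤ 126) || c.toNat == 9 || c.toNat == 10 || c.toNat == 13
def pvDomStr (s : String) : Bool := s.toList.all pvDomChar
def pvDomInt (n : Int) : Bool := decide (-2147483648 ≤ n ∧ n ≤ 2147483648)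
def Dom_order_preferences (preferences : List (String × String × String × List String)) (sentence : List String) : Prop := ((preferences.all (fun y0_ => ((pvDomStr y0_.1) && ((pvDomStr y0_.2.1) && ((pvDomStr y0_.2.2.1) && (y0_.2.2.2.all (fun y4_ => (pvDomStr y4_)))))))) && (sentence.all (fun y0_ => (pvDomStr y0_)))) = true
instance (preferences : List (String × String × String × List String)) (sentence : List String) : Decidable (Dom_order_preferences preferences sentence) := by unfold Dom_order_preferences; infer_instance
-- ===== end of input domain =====

-- B replaces A's per-word re-scan of every preference against the growing
-- sentence by one substring search over the full text plus a bucket sort on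
-- the first matching word index; measurably faster on large inputs.

abbrev Pref := String × String × String × List String

-- ===== PORT A =====
-- subtree[0] raises IndexError on an empty subtree (with a nonempty sentence);
-- Pre_ excludes those inputs, so `headD ""` is never observed on admitted inputs.
def order_preferences (preferences : List (String × String × String × List String)) (sentence : List String) : List (String × String × String × List String) :=
  (sentence.foldl
    (fun (st : List Pref × List Char) word =>
      let ordered_sentence := st.2 ++ ' ' :: word.toList
      let ordered_preferences := preferences.foldl
        (fun op preference =>
          if PySem.Chars.isIn (preference.2.2.2.headD "").toList ordered_sentence
              && !(op.contains preference)
          then op ++ [preference] else op) st.1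
      (ordered_preferences, ordered_sentence))
    (([] : List Pref), ([] : List Char))).1

-- ===== PORT B =====
-- the `while cum[k] < end: k += 1` loop of Source B
def pvKScan : List Nat → Nat → Nat → Nat
  | [], _, k => k
  | c :: rest, e, k => if c < e then pvKScan rest e (k + 1) else k

def order_preferences_alt (preferences : List (String × String × String × List String)) (sentence : List String) : List (String × String × String × List String) :=
  if sentence = [] then []
  else
    let tc := sentence.foldl
      (fun (st : List Char × List Nat) word =>
        let t := st.1 ++ ' ' :: word.toList
        (t, st.2 ++ [t.length])) (([] : List Char), ([] : List Nat))
    let text := tc.1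
    let cum := tc.2
    let unique := preferences.foldl
      (fun u pref => if u.contains pref then u else u ++ [pref]) []
    let buckets := unique.foldl
      (fun bs pref =>
        let sub := (pref.2.2.2.headD "").toList
        let pos := PySem.Chars.find text sub
        if pos == -1 then bs
        else bs.modify (pvKScan cum (pos.toNat + sub.length) 0) (· ++ [pref]))
      (sentence.map (fun _ => ([] : List Pref)))
    buckets.flatten

-- ===== PRECONDITION & SPEC =====
-- Pre_ excludes exactly the inputs on which A raises IndexError: a nonempty
-- sentence together with some preference whose subtree is the empty list.
def Pre_order_preferences (preferences : List (String × String × String × List String)) (sentence : List String) : Prop :=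
  sentence = [] ∨ ∀ p ∈ preferences, p.2.2.2 ≠ []
instance (preferences : List (String × String × String × List String)) (sentence : List String) : Decidable (Pre_order_preferences preferences sentence) := by unfold Pre_order_preferences; infer_instance
def pvWitness_order_preferences : (List (String × String × String × List String)) × List String :=
  ([("food", "pizza", "type", ["pizza"])], ["i", "want", "pizza"])

def Spec_order_preferences (preferences : List (String × String × String × List String)) (sentence : List String) (out : List (String × String × String × List String)) : Prop := out = order_preferences_alt preferences sentence
instance (preferences : List (String × String × String × List String)) (sentence : List String) (out : List (String × String × String × List String)) : Decidable (Spec_order_preferences preferences sentence out) := by unfold Spec_order_preferences; infer_instance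

-- ===== CLAIM (what is proved, stated in full; the proofs are below) =====
def Claim_equal_order_preferences : Prop := ∀ (preferences : List (String × String × String × List String)) (sentence : List String), Dom_order_preferences preferences sentence → Pre_order_preferences preferences sentence → Spec_order_preferences preferences sentence (order_preferences preferences sentence)

-- ===== LEMMAS AND PROOFS =====

-- the phrase a preference is matched by
def pvSub (p : Pref) : List Char := (p.2.2.2.headD "").toList

-- the text of a word list, as A builds it
def pvTextOf (ws : List String) : List Char := ws.foldl (fun t w => t ++ ' ' :: w.toList) []

-- first index k < m with q k
def pvFirstIdx (q : Nat → Bool) : Nat → Option Nat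
  | 0 => none
  | m + 1 =>
    match pvFirstIdx q m with
    | some j => some j
    | none => if q m then some m else none

-- "p's phrase occurs in the text of the first k words"
def pvC (ws : List String) (k : Nat) (p : Pref) : Bool :=
  PySem.Chars.isIn (pvSub p) (pvTextOf (ws.take k))

-- bucket index of p: the first k with pvC ws (k+1) p
def pvM (ws : List String) (p : Pref) : Option Nat :=
  pvFirstIdx (fun k => pvC ws (k + 1) p) ws.length

-- the canonical result both programs compute
def pvO (prefs : List Pref) (ws : List String) : List Pref :=
  (List.range ws.length).flatMap
    (fun j => (PySem.Set.ofList prefs).filter (fun p => pvM ws p == some j))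

theorem pvTextOf_foldl (l : List String) : ∀ (a : List Char),
    l.foldl (fun t w => t ++ ' ' :: w.toList) a = a ++ pvTextOf l := by
  induction l with
  | nil => intro a; simp [pvTextOf]
  | cons w rest ih =>
    intro a
    have h2 : pvTextOf (w :: rest) = (' ' :: w.toList) ++ pvTextOf rest := by
      show List.foldl _ ([] ++ ' ' :: w.toList) rest = _
      rw [ih]; simp
    simp only [List.foldl_cons, ih, h2]
    simp

theorem pvTextOf_append (l₁ l₂ : List String) :
    pvTextOf (l₁ ++ l₂) = pvTextOf l₁ ++ pvTextOf l₂ := by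
  show List.foldl _ _ _ = _
  rw [List.foldl_append]
  show List.foldl _ (pvTextOf l₁) l₂ = _
  rw [pvTextOf_foldl]

theorem pvTextOf_take_prefix (ws : List String) (k : Nat) :
    pvTextOf (ws.take k) <+: pvTextOf ws := by
  refine ⟨pvTextOf (ws.drop k), ?_⟩
  rw [← pvTextOf_append, List.take_append_drop]

theorem pvFirstIdx_none_iff (q : Nat → Bool) (m : Nat) :
    pvFirstIdx q m = none ↔ ∀ i < m, q i = false := by
  induction m with
  | zero => simp [pvFirstIdx]
  | succ m ih =>
    rw [pvFirstIdx]
    rcases h : pvFirstIdx q m with _ | j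
    · by_cases hq : q m
      · simp only [hq]
        constructor
        · intro hh; simp at hh
        · intro hall; rw [hall m (Nat.lt_succ_self m)] at hq; cases hq
      · simp only [Bool.not_eq_true] at hq
        simp only [hq]
        constructor
        · intro _ i hi
          rcases Nat.lt_succ_iff_lt_or_eq.mp hi with h1 | h1
          · exact ih.mp h i h1
          · subst h1; exact hq
        · intro _; simp
    · constructor
      · intro hh; cases hh
      · intro hall
        have := ih.mpr (fun i hi => hall i (Nat.lt_succ_of_lt hi))
        rw [h] at this; cases this

theorem pvFirstIdx_eq_some (q : Nat → Bool) (m : Nat) : ∀ {j : Nat},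
    pvFirstIdx q m = some j →
    j < m ∧ q j = true ∧ ∀ i < j, q i = false := by
  induction m with
  | zero => intro j h; simp [pvFirstIdx] at h
  | succ m ih =>
    intro j h
    rw [pvFirstIdx] at h
    rcases hm : pvFirstIdx q m with _ | j'
    · rw [hm] at h
      by_cases hq : q m
      · simp only [hq, if_pos] at h
        simp only [Option.some.injEq] at h; subst h
        exact ⟨Nat.lt_succ_self _, hq, fun i hi => (pvFirstIdx_none_iff q m).mp hm i hi⟩
      · simp only [Bool.not_eq_true] at hq; rw [hq] at h; simp at h
    · rw [hm] at h; simp only [Option.some.injEq] at h; subst h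
      obtain ⟨h1, h2, h3⟩ := ih hm
      exact ⟨Nat.lt_succ_of_lt h1, h2, h3⟩

theorem pvFirstIdx_of_spec (q : Nat → Bool) (m : Nat) {j : Nat}
    (hj : j < m) (hq : q j = true) (hmin : ∀ i < j, q i = false) :
    pvFirstIdx q m = some j := by
  induction m with
  | zero => omega
  | succ m ih =>
    rw [pvFirstIdx]
    rcases Nat.lt_succ_iff_lt_or_eq.mp hj with h1 | h1
    · rw [ih h1]
    · subst h1
      have hnone : pvFirstIdx q j = none := (pvFirstIdx_none_iff q j).mpr hmin
      rw [hnone]; simp [hq]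

theorem pvFirstIdx_congr {q q' : Nat → Bool} (m : Nat)
    (h : ∀ i < m, q i = q' i) : pvFirstIdx q m = pvFirstIdx q' m := by
  induction m with
  | zero => rfl
  | succ m ih =>
    rw [pvFirstIdx, pvFirstIdx, ih (fun i hi => h i (Nat.lt_succ_of_lt hi)),
      h m (Nat.lt_succ_self m)]

theorem pvUpdate_cons {α : Type} [BEq α] (u : List α) (p : α) (l : List α) :
    PySem.Set.update u (p :: l) = PySem.Set.update (PySem.Set.add u p) l := rfl

-- A's inner loop is a Set.update of the matched preferences
theorem pvInner_eq_update (os : List Char) (l : List Pref) : ∀ (u : List Pref),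
    l.foldl (fun op preference =>
      if PySem.Chars.isIn (preference.2.2.2.headD "").toList os
          && !(op.contains preference)
      then op ++ [preference] else op) u
    = PySem.Set.update u (l.filter (fun p => PySem.Chars.isIn (pvSub p) os)) := by
  induction l with
  | nil => intro u; simp [PySem.Set.update]
  | cons p rest ih =>
    intro u
    simp only [List.foldl_cons, List.filter_cons]
    by_cases hin : PySem.Chars.isIn (pvSub p) os = true
    · have hin2 : PySem.Chars.isIn (p.2.2.2.headD "").toList os = true := by
        simpa [pvSub] using hin
      rw [if_pos hin, pvUpdate_cons]
      have hbody : (if (PySem.Chars.isIn (p.2.2.2.headD "").toList os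
            && !(u.contains p)) = true then u ++ [p] else u) = PySem.Set.add u p := by
        rw [hin2]
        simp only [Bool.true_and, PySem.Set.add, PySem.Set.contains_eq_listContains]
        by_cases hc : u.contains p <;> simp_all
      rw [hbody, ih]
    · have hin2 : PySem.Chars.isIn (p.2.2.2.headD "").toList os = false := by
        simp only [pvSub] at hin; simpa using hin
      rw [if_neg hin]
      have hbody : (if (PySem.Chars.isIn (p.2.2.2.headD "").toList os
            && !(u.contains p)) = true then u ++ [p] else u) = u := by
        rw [hin2]; simp
      rw [hbody, ih]

theorem pvOfList_append_singleton {α : Type} [BEq α] (l : List α) (x : α) :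
    PySem.Set.ofList (l ++ [x]) = PySem.Set.add (PySem.Set.ofList l) x := by
  rw [PySem.Set.ofList_eq_foldl, PySem.Set.ofList_eq_foldl, List.foldl_append]
  rfl

theorem pvOfList_filter {α : Type} [BEq α] [LawfulBEq α] (q : α → Bool) (l : List α) :
    PySem.Set.ofList (l.filter q) = (PySem.Set.ofList l).filter q := by
  induction l using List.reverseRecOn with
  | nil => simp
  | append_singleton l x ih =>
    rw [List.filter_append, pvOfList_append_singleton]
    by_cases hq : q x = true
    · have hfs : List.filter q [x] = [x] := by simp [hq]
      rw [hfs, pvOfList_append_singleton, ih]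
      by_cases hx : x ∈ l
      · simp [PySem.Set.add, hx, hq]
      · simp [PySem.Set.add, hx, hq, List.filter_append]
    · have hqf : q x = false := by simpa using hq
      have hfs : List.filter q [x] = [] := by simp [hqf]
      rw [hfs, List.append_nil, ih]
      by_cases hx : x ∈ l
      · simp [PySem.Set.add, hx]
      · simp [PySem.Set.add, hx, List.filter_append, hqf]

theorem pvMem_pvO (prefs : List Pref) (ws : List String) (p : Pref) :
    p ∈ pvO prefs ws ↔ p ∈ PySem.Set.ofList prefs ∧ pvM ws p ≠ none := by
  unfold pvO
  simp only [List.mem_flatMap, List.mem_range, List.mem_filter, beq_iff_eq]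
  constructor
  · rintro ⟨j, hj, hmem, hMj⟩
    exact ⟨hmem, by rw [hMj]; simp⟩
  · rintro ⟨hmem, hM⟩
    rcases hMv : pvM ws p with _ | j
    · exact absurd hMv hM
    · obtain ⟨hj, _, _⟩ := pvFirstIdx_eq_some _ _ hMv
      exact ⟨j, hj, hmem, rfl⟩

-- one outer step of A
theorem pvO_step (prefs : List Pref) (ws : List String) (w : String) :
    PySem.Set.update (pvO prefs ws)
      (prefs.filter (fun p => PySem.Chars.isIn (pvSub p) (pvTextOf (ws ++ [w]))))
    = pvO prefs (ws ++ [w]) := by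
  have hlen : (ws ++ [w]).length = ws.length + 1 := by simp
  have htakefull : List.take (ws.length + 1) (ws ++ [w]) = ws ++ [w] :=
    List.take_of_length_le (by simp)
  have hq : ∀ p k, k < ws.length → pvC (ws ++ [w]) (k + 1) p = pvC ws (k + 1) p := by
    intro p k hk
    unfold pvC
    rw [List.take_append_of_le_length (by omega)]
  have hMsucc : ∀ p, pvM (ws ++ [w]) p
      = match pvM ws p with
        | some j => some j
        | none => if pvC (ws ++ [w]) (ws.length + 1) p then some ws.length else none := by
    intro p
    unfold pvM
    rw [hlen, pvFirstIdx, pvFirstIdx_congr ws.length (fun i hi => hq p i hi)]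
  rw [PySem.Set.update_eq_append_filter, pvOfList_filter]
  unfold pvO
  rw [hlen, List.range_succ, List.flatMap_append]
  congr 1
  · apply List.flatMap_congr
    intro j hj
    rw [List.mem_range] at hj
    apply List.filter_congr
    intro p _
    rw [hMsucc p]
    rcases hM : pvM ws p with _ | j'
    · dsimp only
      by_cases hc : pvC (ws ++ [w]) (ws.length + 1) p
      · rw [if_pos hc]
        have h1 : ((some ws.length : Option Nat) == some j) = false := by
          simp; omega
        have h2 : ((none : Option Nat) == some j) = false := by simp
        rw [h1, h2]
      · simp only [Bool.not_eq_true] at hc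
        rw [hc]
        simp
    · simp
  · simp only [List.flatMap_cons, List.flatMap_nil, List.append_nil]
    rw [List.filter_filter]
    apply List.filter_congr
    intro p hp
    rw [hMsucc p]
    rcases hM : pvM ws p with _ | j'
    · dsimp only
      by_cases hc : pvC (ws ++ [w]) (ws.length + 1) p
      · have hnc : PySem.Set.contains
            (List.flatMap (fun j => List.filter (fun p => pvM ws p == some j)
              (PySem.Set.ofList prefs)) (List.range ws.length)) p = false := by
          show PySem.Set.contains (pvO prefs ws) p = false
          rw [PySem.Set.contains_eq_listContains, ← Bool.not_eq_true, List.contains_iff_mem]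
          intro hmem
          exact ((pvMem_pvO prefs ws p).mp hmem).2 hM
        have hcc : PySem.Chars.isIn (pvSub p) (pvTextOf (ws ++ [w])) = true := by
          unfold pvC at hc; rwa [htakefull] at hc
        rw [hcc, hnc, if_pos hc]
        simp
      · simp only [Bool.not_eq_true] at hc
        have hcc : PySem.Chars.isIn (pvSub p) (pvTextOf (ws ++ [w])) = false := by
          unfold pvC at hc; rwa [htakefull] at hc
        rw [hcc, hc]
        simp
    · have hmem : p ∈ pvO prefs ws :=
        (pvMem_pvO prefs ws p).mpr ⟨hp, by rw [hM]; simp⟩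
      have hcont : PySem.Set.contains
          (List.flatMap (fun j => List.filter (fun p => pvM ws p == some j)
            (PySem.Set.ofList prefs)) (List.range ws.length)) p = true := by
        show PySem.Set.contains (pvO prefs ws) p = true
        rw [PySem.Set.contains_eq_listContains, List.contains_iff_mem]
        exact hmem
      have hj' : j' < ws.length := (pvFirstIdx_eq_some _ _ hM).1
      dsimp only
      rw [hcont]
      have hr : ((some j' : Option Nat) == some ws.length) = false := by
        simp; omega
      rw [hr]
      simp

theorem pvStateA (prefs : List Pref) (ws : List String) :
    ws.foldl
      (fun (st : List Pref × List Char) word =>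
        let ordered_sentence := st.2 ++ ' ' :: word.toList
        let ordered_preferences := prefs.foldl
          (fun op preference =>
            if PySem.Chars.isIn (preference.2.2.2.headD "").toList ordered_sentence
                && !(op.contains preference)
            then op ++ [preference] else op) st.1
        (ordered_preferences, ordered_sentence))
      (([] : List Pref), ([] : List Char))
    = (pvO prefs ws, pvTextOf ws) := by
  induction ws using List.reverseRecOn with
  | nil => simp [pvO, pvTextOf]
  | append_singleton ws w ih =>
    rw [List.foldl_append, ih]
    simp only [List.foldl_cons, List.foldl_nil]
    have htext : pvTextOf ws ++ ' ' :: w.toList = pvTextOf (ws ++ [w]) := by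
      rw [pvTextOf_append]; simp [pvTextOf]
    rw [htext, pvInner_eq_update, pvO_step]

-- cumulative prefix lengths of B
def pvCumOf (ws : List String) : List Nat :=
  (List.range ws.length).map (fun j => (pvTextOf (ws.take (j + 1))).length)

theorem pvStateB (ws : List String) :
    ws.foldl
      (fun (st : List Char × List Nat) word =>
        let t := st.1 ++ ' ' :: word.toList
        (t, st.2 ++ [t.length])) (([] : List Char), ([] : List Nat))
    = (pvTextOf ws, pvCumOf ws) := by
  induction ws using List.reverseRecOn with
  | nil => simp [pvTextOf, pvCumOf]
  | append_singleton ws w ih =>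
    rw [List.foldl_append, ih]
    simp only [List.foldl_cons, List.foldl_nil]
    have htext : pvTextOf ws ++ ' ' :: w.toList = pvTextOf (ws ++ [w]) := by
      rw [pvTextOf_append]; simp [pvTextOf]
    rw [htext]
    have hcum : pvCumOf ws ++ [(pvTextOf (ws ++ [w])).length] = pvCumOf (ws ++ [w]) := by
      unfold pvCumOf
      rw [List.length_append, List.length_singleton, List.range_succ, List.map_append]
      congr 1
      · apply List.map_congr_left
        intro j hj
        rw [List.mem_range] at hj
        rw [List.take_append_of_le_length (by omega)]
      · simp [List.take_of_length_le (by simp : (ws ++ [w]).length ≤ ws.length + 1)]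
    rw [hcum]

theorem pvKScan_succ (cs : List Nat) (e : Nat) : ∀ (k : Nat),
    pvKScan cs e (k + 1) = pvKScan cs e k + 1 := by
  induction cs with
  | nil => intro k; rfl
  | cons c rest ih =>
    intro k
    by_cases h : c < e <;> simp [pvKScan, h, ih]

theorem pvKScan_spec (cs : List Nat) (e : Nat)
    (h : ∃ i, ∃ hi : i < cs.length, e ≤ cs[i]) :
    ∃ hK : pvKScan cs e 0 < cs.length,
      e ≤ cs[pvKScan cs e 0] ∧ ∀ i (hi : i < pvKScan cs e 0), cs[i]'(by omega) < e := by
  induction cs with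
  | nil => obtain ⟨i, hi, _⟩ := h; simp at hi
  | cons c rest ih =>
    by_cases hc : c < e
    · have hrest : ∃ i, ∃ hi : i < rest.length, e ≤ rest[i] := by
        obtain ⟨i, hi, hei⟩ := h
        match i with
        | 0 => simp at hei; omega
        | i + 1 => exact ⟨i, by simpa using hi, by simpa using hei⟩
      obtain ⟨hK, hKe, hKmin⟩ := ih hrest
      have hscan : pvKScan (c :: rest) e 0 = pvKScan rest e 0 + 1 := by
        simp [pvKScan, hc, pvKScan_succ]
      refine ⟨by simpa [hscan] using Nat.succ_lt_succ hK, ?_, ?_⟩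
      · simp only [hscan]; simpa using hKe
      · intro i hi
        rw [hscan] at hi
        match i with
        | 0 => simpa using hc
        | i + 1 =>
          have := hKmin i (by omega)
          simpa using this
    · have hscan : pvKScan (c :: rest) e 0 = 0 := by simp [pvKScan, hc]
      refine ⟨by simp [hscan], ?_, ?_⟩
      · simp only [hscan]; simpa using Nat.le_of_not_lt hc
      · intro i hi; rw [hscan] at hi; omega

theorem pvBucketFold_length {α : Type} (mt : α → Bool) (ko : α → Nat) (l : List α) :
    ∀ (bs : List (List α)),
    (l.foldl (fun bs p => if mt p then bs else bs.modify (ko p) (· ++ [p])) bs).length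
      = bs.length := by
  induction l with
  | nil => intro bs; rfl
  | cons p rest ih =>
    intro bs
    simp only [List.foldl_cons]
    by_cases hm : mt p
    · rw [if_pos hm, ih]
    · rw [if_neg hm, ih, List.length_modify]

theorem pvBucketFold_getElem {α : Type} (mt : α → Bool) (ko : α → Nat) (l : List α) :
    ∀ (bs : List (List α)) (j : Nat) (hj : j < bs.length),
    (l.foldl (fun bs p => if mt p then bs else bs.modify (ko p) (· ++ [p])) bs)[j]'(by
        rw [pvBucketFold_length]; exact hj)
      = bs[j] ++ l.filter (fun p => !mt p && (ko p == j)) := by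
  induction l with
  | nil => intro bs j hj; simp
  | cons p rest ih =>
    intro bs j hj
    simp only [List.foldl_cons, List.filter_cons]
    by_cases hm : mt p
    · have h1 : (if mt p = true then bs else bs.modify (ko p) (· ++ [p])) = bs := if_pos hm
      have h2 : (!mt p && (ko p == j)) = false := by simp [hm]
      simp only [h1, h2, if_neg (Bool.false_ne_true)]
      exact ih bs j hj
    · have h1 : (if mt p = true then bs else bs.modify (ko p) (· ++ [p]))
          = bs.modify (ko p) (· ++ [p]) := if_neg hm
      have hlen : j < (bs.modify (ko p) (· ++ [p])).length := by
        rw [List.length_modify]; exact hj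
      simp only [h1]
      rw [ih (bs.modify (ko p) (· ++ [p])) j hlen]
      rw [List.getElem_modify]
      by_cases hk : ko p = j
      · have h2 : (!mt p && (ko p == j)) = true := by simp [hm, hk]
        rw [h2, if_pos hk]
        simp
      · have h2 : (!mt p && (ko p == j)) = false := by simp [hm, hk]
        rw [h2, if_neg hk]
        simp

-- substring of a prefix ↔ the first occurrence ends inside the prefix
theorem pvInfixTake_iff (T sub : List Char) (m : Nat) :
    sub <:+: T.take m ↔
      0 ≤ PySem.Chars.find T sub ∧ (PySem.Chars.find T sub).toNat + sub.length ≤ m := by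
  constructor
  · intro hinf
    obtain ⟨j, hpre⟩ := (PySem.Chars.exists_prefix_drop_iff_isIn sub (T.take m)).mpr
      ((PySem.Chars.isIn_iff_infix sub (T.take m)).mpr hinf)
    rw [List.drop_take] at hpre
    have hsubT : sub <+: T.drop j := (List.prefix_take_iff.mp hpre).1
    have hlen : sub.length ≤ m - j := (List.prefix_take_iff.mp hpre).2
    have hfind : 0 ≤ PySem.Chars.find T sub := by
      rw [PySem.Chars.find_nonneg_iff]
      rw [← PySem.Chars.isIn_iff_infix]
      exact (PySem.Chars.exists_prefix_drop_iff_isIn sub T).mp ⟨j, hsubT⟩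
    refine ⟨hfind, ?_⟩
    obtain ⟨_, hmin⟩ := PySem.Chars.find_spec hfind
    have hjge : (PySem.Chars.find T sub).toNat ≤ j := by
      by_contra hlt
      exact hmin j (by omega) hsubT
    by_cases hjm : j ≤ m
    · omega
    · -- j > m: then m - j = 0, sub = [], find T [] = 0
      have : sub.length = 0 := by omega
      have hnil : sub = [] := List.length_eq_zero_iff.mp this
      subst hnil
      rw [PySem.Chars.find_nil]
      simp
  · rintro ⟨hfind, hend⟩
    obtain ⟨hpre, _⟩ := PySem.Chars.find_spec hfind
    set f := (PySem.Chars.find T sub).toNat with hf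
    rw [← PySem.Chars.isIn_iff_infix]
    rw [← PySem.Chars.exists_prefix_drop_iff_isIn]
    refine ⟨f, ?_⟩
    rw [List.drop_take]
    rw [List.prefix_take_iff]
    exact ⟨hpre, by omega⟩

theorem pvFindEnd_le (T sub : List Char) (h : 0 ≤ PySem.Chars.find T sub) :
    (PySem.Chars.find T sub).toNat + sub.length ≤ T.length := by
  obtain ⟨hpre, _⟩ := PySem.Chars.find_spec h
  have h1 := hpre.length_le
  have h2 : (PySem.Chars.find T sub).toNat ≤ T.length := by
    have := PySem.Chars.find_le_length T sub
    omega
  rw [List.length_drop] at h1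
  omega

theorem pvCumOf_getElem (ws : List String) (k : Nat) (hk : k < ws.length) :
    (pvCumOf ws)[k]'(by simp [pvCumOf]; omega)
      = (pvTextOf (ws.take (k + 1))).length := by
  simp [pvCumOf]

theorem pvTextOf_take_eq (ws : List String) (k : Nat) :
    pvTextOf (ws.take k) = (pvTextOf ws).take (pvTextOf (ws.take k)).length :=
  List.prefix_iff_eq_take.mp (pvTextOf_take_prefix ws k)

-- B's per-preference test agrees with the canonical bucket index
theorem pvPointwise (ws : List String) (hws : ws ≠ []) (p : Pref) (j : Nat)
    (_hj : j < ws.length) :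
    (!(PySem.Chars.find (pvTextOf ws) (pvSub p) == -1)
      && (pvKScan (pvCumOf ws) ((PySem.Chars.find (pvTextOf ws) (pvSub p)).toNat + (pvSub p).length) 0 == j))
    = (pvM ws p == some j) := by
  have hcumlen : (pvCumOf ws).length = ws.length := by simp [pvCumOf]
  by_cases hf : PySem.Chars.find (pvTextOf ws) (pvSub p) = -1
  · have hnone : pvM ws p = none := by
      unfold pvM
      rw [pvFirstIdx_none_iff]
      intro i _
      by_contra hqq
      rw [Bool.not_eq_false] at hqq
      unfold pvC at hqq
      rw [PySem.Chars.isIn_iff_infix] at hqq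
      have hinf : pvSub p <:+: pvTextOf ws :=
        hqq.trans (pvTextOf_take_prefix ws (i + 1)).isInfix
      exact (PySem.Chars.find_eq_neg_one_iff _ _).mp hf hinf
    simp [hf, hnone]
  · have hge : 0 ≤ PySem.Chars.find (pvTextOf ws) (pvSub p) := by
      have := PySem.Chars.neg_one_le_find (pvTextOf ws) (pvSub p)
      omega
    set e := (PySem.Chars.find (pvTextOf ws) (pvSub p)).toNat + (pvSub p).length with he
    have hee : e ≤ (pvTextOf ws).length := pvFindEnd_le _ _ hge
    have hn : 0 < ws.length := List.length_pos_iff.mpr hws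
    have hlast : (pvCumOf ws)[ws.length - 1]'(by omega) = (pvTextOf ws).length := by
      rw [pvCumOf_getElem ws (ws.length - 1) (by omega)]
      congr 2
      rw [List.take_of_length_le (by omega)]
    have hex : ∃ i, ∃ hi : i < (pvCumOf ws).length, e ≤ (pvCumOf ws)[i] :=
      ⟨ws.length - 1, by omega, by rw [hlast]; exact hee⟩
    obtain ⟨hK, hKe, hKmin⟩ := pvKScan_spec (pvCumOf ws) e hex
    have hqiff : ∀ k, (hk : k < ws.length) →
        (pvC ws (k + 1) p = true ↔ e ≤ (pvCumOf ws)[k]'(by omega)) := by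
      intro k hk
      unfold pvC
      rw [pvCumOf_getElem ws k hk]
      rw [PySem.Chars.isIn_iff_infix]
      conv_lhs => rw [pvTextOf_take_eq ws (k + 1)]
      rw [pvInfixTake_iff]
      constructor
      · rintro ⟨_, h2⟩; exact h2
      · intro h2; exact ⟨hge, h2⟩
    have hMK : pvM ws p = some (pvKScan (pvCumOf ws) e 0) := by
      apply pvFirstIdx_of_spec
      · omega
      · exact (hqiff _ (by omega)).mpr hKe
      · intro i hi
        rw [← Bool.not_eq_true]
        intro hqq
        have := (hqiff i (by omega)).mp hqq
        have := hKmin i hi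
        omega
    rw [hMK]
    have hff : (PySem.Chars.find (pvTextOf ws) (pvSub p) == -1) = false := by
      simpa using hf
    rw [hff]
    simp only [Bool.not_false, Bool.true_and]
    by_cases hkj : pvKScan (pvCumOf ws) e 0 = j
    · simp [hkj]
    · simp

theorem pvA_eq (prefs : List Pref) (ws : List String) :
    order_preferences prefs ws = pvO prefs ws := by
  unfold order_preferences
  rw [pvStateA]

theorem pvFoldAdd (l : List Pref) : ∀ (u : List Pref),
    l.foldl (fun u pref => if u.contains pref then u else u ++ [pref]) u
      = PySem.Set.update u l := by
  induction l with
  | nil => intro u; rfl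
  | cons p rest ih =>
    intro u
    simp only [List.foldl_cons, pvUpdate_cons]
    have : (if u.contains p then u else u ++ [p]) = PySem.Set.add u p := by
      simp [PySem.Set.add, PySem.Set.contains_eq_listContains]
    rw [this, ih]

theorem pvB_eq (prefs : List Pref) (ws : List String) :
    order_preferences_alt prefs ws = pvO prefs ws := by
  unfold order_preferences_alt
  by_cases hws : ws = []
  · subst hws; simp [pvO]
  · rw [if_neg hws]
    simp only [pvStateB, pvFoldAdd]
    have hupd : PySem.Set.update ([] : List Pref) prefs = PySem.Set.ofList prefs := by
      rw [PySem.Set.ofList_eq_foldl]; rfl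
    rw [hupd]
    have hinitlen : (ws.map (fun _ => ([] : List Pref))).length = ws.length := by simp
    have hR : (PySem.Set.ofList prefs).foldl
        (fun bs pref =>
          if (PySem.Chars.find (pvTextOf ws) ((pref.2.2.2.headD "").toList) == -1) then bs
          else bs.modify
            (pvKScan (pvCumOf ws)
              ((PySem.Chars.find (pvTextOf ws) ((pref.2.2.2.headD "").toList)).toNat
                + ((pref.2.2.2.headD "").toList).length) 0)
            (· ++ [pref]))
        (ws.map (fun _ => ([] : List Pref)))
      = (List.range ws.length).map (fun j =>
          (PySem.Set.ofList prefs : List Pref).filter (fun p =>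
            !(PySem.Chars.find (pvTextOf ws) ((p.2.2.2.headD "").toList) == -1)
            && (pvKScan (pvCumOf ws)
                ((PySem.Chars.find (pvTextOf ws) ((p.2.2.2.headD "").toList)).toNat
                  + ((p.2.2.2.headD "").toList).length) 0 == j))) := by
      apply List.ext_getElem
      · rw [pvBucketFold_length]; simp
      · intro j h1 h2
        rw [pvBucketFold_getElem
          (fun pref => (PySem.Chars.find (pvTextOf ws) ((pref.2.2.2.headD "").toList) == -1))
          (fun pref => pvKScan (pvCumOf ws)
            ((PySem.Chars.find (pvTextOf ws) ((pref.2.2.2.headD "").toList)).toNat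
              + ((pref.2.2.2.headD "").toList).length) 0)
          (PySem.Set.ofList prefs)
          (ws.map (fun _ => ([] : List Pref))) j (by simpa using (by simpa using h2))]
        simp
    rw [hR, ← List.flatMap_def]
    unfold pvO
    apply List.flatMap_congr
    intro j hj
    rw [List.mem_range] at hj
    apply List.filter_congr
    intro p _
    exact pvPointwise ws hws p j hj

-- ===== VERDICT (by name: the statement is the Claim_ definition above) =====
theorem order_preferences_spec : Claim_equal_order_preferences := by
  intro prefs sentence _ _
  unfold Spec_order_preferences
  rw [pvA_eq, pvB_eq]
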